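-- pv_equiv track=rewrite | github.com/karthik-chopperla/recycling-guide-generator | logic/contamination_checker.py | check_for_contamination
-- ===== SOURCE A (Python) =====
-- def check_for_contamination(description: str) -> (str, str):
--     """
--     Analyzes item description to determine contamination status and reason.
--     Returns:
--     - contamination_level: Clean / Contaminated / Highly Contaminated
--     - reason: Context-specific explanation (brief)
--     """
--     desc = description.lower()
--
--     # Keyword groups
--     curry_related = ["curry", "gravy", "sabzi", "masala", "dal"]
--     rice_related = ["rice", "biryani", "fried rice", "leftover rice"]
--     dairy_related = ["milk", "curd", "yogurt", "paneer", "cheese", "buttermilk"]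
--     grease_related = ["grease", "greasy", "butter", "ghee", "oil", "oily"]
--     vegetable_related = ["vegetable", "peels", "boiled", "uncooked", "raw", "salad"]
--     crumb_related = ["crumbs", "scrap", "leftover", "bite", "half-eaten"]
--     wet_related = ["wet", "soaked", "stained", "liquid", "moist"]
--     general_spoilage = ["spoiled", "rotten", "stale", "smelly", "fungus", "mold"]
--
--     level = "Clean"
--     reason = "No contamination detected."
--
--     if any(word in desc for word in curry_related):
--         level = "Highly Contaminated"
--         reason = "Contains curry-based oily/spiced residue."
--
--     elif any(word in desc for word in dairy_related):
--         level = "Highly Contaminated"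
--         reason = "Contains dairy residue which spoils fast."
--
--     elif any(word in desc for word in rice_related):
--         level = "Contaminated"
--         reason = "Contains fermentable starchy food (rice)."
--
--     elif any(word in desc for word in grease_related):
--         level = "Contaminated"
--         reason = "Grease or oil present — contaminates recyclables."
--
--     elif any(word in desc for word in vegetable_related):
--         level = "Contaminated"
--         reason = "Vegetable matter introduces decay/moisture."
--
--     elif any(word in desc for word in wet_related):
--         level = "Contaminated"
--         reason = "Wet or stained item reduces recyclability."
--
--     elif any(word in desc for word in crumb_related):
--         level = "Contaminated"
--         reason = "Contains leftover food crumbs or bites."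
--
--     elif any(word in desc for word in general_spoilage):
--         level = "Contaminated"
--         reason = "Spoiled or moldy item — unsafe for recycling."
--
--     return level, reason
-- ===== SOURCE B (Python) =====
-- GROUPS = [
--     ["curry", "gravy", "sabzi", "masala", "dal"],
--     ["milk", "curd", "yogurt", "paneer", "cheese", "buttermilk"],
--     ["rice", "biryani", "fried rice", "leftover rice"],
--     ["grease", "greasy", "butter", "ghee", "oil", "oily"],
--     ["vegetable", "peels", "boiled", "uncooked", "raw", "salad"],
--     ["wet", "soaked", "stained", "liquid", "moist"],
--     ["crumbs", "scrap", "leftover", "bite", "half-eaten"],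
--     ["spoiled", "rotten", "stale", "smelly", "fungus", "mold"],
-- ]
-- RESULTS = [
--     ("Highly Contaminated", "Contains curry-based oily/spiced residue."),
--     ("Highly Contaminated", "Contains dairy residue which spoils fast."),
--     ("Contaminated", "Contains fermentable starchy food (rice)."),
--     ("Contaminated", "Grease or oil present — contaminates recyclables."),
--     ("Contaminated", "Vegetable matter introduces decay/moisture."),
--     ("Contaminated", "Wet or stained item reduces recyclability."),
--     ("Contaminated", "Contains leftover food crumbs or bites."),
--     ("Contaminated", "Spoiled or moldy item — unsafe for recycling."),
-- ]
-- PRIORITY = {kw: i for i, kws in enumerate(GROUPS) for kw in kws}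
--
--
-- def check_for_contamination(description: str) -> (str, str):
--     desc = description.lower()
--     best = min((p for kw, p in PRIORITY.items() if kw in desc), default=None)
--     if best is None:
--         return ("Clean", "No contamination detected.")
--     return RESULTS[best]
-- ===== Notes on version B (the rewrite author's own statement) =====
-- stated objective: alternative
-- what changed: Replaces the ordered short-circuit if/elif chain with a flat keyword-to-priority dict and a full-pass min-reduction: B tests every keyword, collects the priorities of all matches, and returns the result with the minimum matched priority (no short-circuit, different data structure and reduction).
import Mathlib
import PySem

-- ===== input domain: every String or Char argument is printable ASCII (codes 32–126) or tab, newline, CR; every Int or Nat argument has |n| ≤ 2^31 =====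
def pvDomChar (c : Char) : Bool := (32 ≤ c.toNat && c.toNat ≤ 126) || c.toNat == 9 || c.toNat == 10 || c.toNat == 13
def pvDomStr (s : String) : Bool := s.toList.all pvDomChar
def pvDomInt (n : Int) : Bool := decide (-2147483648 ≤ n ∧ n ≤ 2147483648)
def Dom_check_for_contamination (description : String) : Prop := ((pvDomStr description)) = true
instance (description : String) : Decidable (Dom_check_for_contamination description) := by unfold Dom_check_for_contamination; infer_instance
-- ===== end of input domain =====

-- B replaces the ordered if/elif chain by a flat keyword→priority map and a full-pass
-- min-reduction over the priorities of all matched keywords (alternative structure, same cost).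

-- ===== PORT A =====
def check_for_contamination (description : String) : String × String :=
  let desc := PySem.Str.lower description
  let curry_related := ["curry", "gravy", "sabzi", "masala", "dal"]
  let rice_related := ["rice", "biryani", "fried rice", "leftover rice"]
  let dairy_related := ["milk", "curd", "yogurt", "paneer", "cheese", "buttermilk"]
  let grease_related := ["grease", "greasy", "butter", "ghee", "oil", "oily"]
  let vegetable_related := ["vegetable", "peels", "boiled", "uncooked", "raw", "salad"]
  let crumb_related := ["crumbs", "scrap", "leftover", "bite", "half-eaten"]
  let wet_related := ["wet", "soaked", "stained", "liquid", "moist"]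
  let general_spoilage := ["spoiled", "rotten", "stale", "smelly", "fungus", "mold"]
  if curry_related.any (fun word => PySem.Str.isIn word desc) then
    ("Highly Contaminated", "Contains curry-based oily/spiced residue.")
  else if dairy_related.any (fun word => PySem.Str.isIn word desc) then
    ("Highly Contaminated", "Contains dairy residue which spoils fast.")
  else if rice_related.any (fun word => PySem.Str.isIn word desc) then
    ("Contaminated", "Contains fermentable starchy food (rice).")
  else if grease_related.any (fun word => PySem.Str.isIn word desc) then
    ("Contaminated", "Grease or oil present — contaminates recyclables.")
  else if vegetable_related.any (fun word => PySem.Str.isIn word desc) then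
    ("Contaminated", "Vegetable matter introduces decay/moisture.")
  else if wet_related.any (fun word => PySem.Str.isIn word desc) then
    ("Contaminated", "Wet or stained item reduces recyclability.")
  else if crumb_related.any (fun word => PySem.Str.isIn word desc) then
    ("Contaminated", "Contains leftover food crumbs or bites.")
  else if general_spoilage.any (fun word => PySem.Str.isIn word desc) then
    ("Contaminated", "Spoiled or moldy item — unsafe for recycling.")
  else
    ("Clean", "No contamination detected.")

-- ===== PORT B =====
def pvGroups : List (List String) :=
  [ ["curry", "gravy", "sabzi", "masala", "dal"],
    ["milk", "curd", "yogurt", "paneer", "cheese", "buttermilk"],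
    ["rice", "biryani", "fried rice", "leftover rice"],
    ["grease", "greasy", "butter", "ghee", "oil", "oily"],
    ["vegetable", "peels", "boiled", "uncooked", "raw", "salad"],
    ["wet", "soaked", "stained", "liquid", "moist"],
    ["crumbs", "scrap", "leftover", "bite", "half-eaten"],
    ["spoiled", "rotten", "stale", "smelly", "fungus", "mold"] ]

def pvResults : List (String × String) :=
  [ ("Highly Contaminated", "Contains curry-based oily/spiced residue."),
    ("Highly Contaminated", "Contains dairy residue which spoils fast."),
    ("Contaminated", "Contains fermentable starchy food (rice)."),
    ("Contaminated", "Grease or oil present — contaminates recyclables."),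
    ("Contaminated", "Vegetable matter introduces decay/moisture."),
    ("Contaminated", "Wet or stained item reduces recyclability."),
    ("Contaminated", "Contains leftover food crumbs or bites."),
    ("Contaminated", "Spoiled or moldy item — unsafe for recycling.") ]

-- PRIORITY = {kw: i for i, kws in enumerate(GROUPS) for kw in kws}  (all keywords distinct,
-- so the dict is this association list in insertion order)
def pvPriority : List (String × Int) :=
  (PySem.List.enumerate pvGroups).flatMap (fun ig => ig.2.map (fun w => (w, ig.1)))

def check_for_contamination_alt (description : String) : String × String :=
  let desc := PySem.Str.lower description
  let best := PySem.List.min?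
    ((pvPriority.filter (fun kp => PySem.Str.isIn kp.1 desc)).map Prod.snd) (fun x => x)
  match best with
  | none => ("Clean", "No contamination detected.")
  | some i => PySem.List.pyGetD pvResults i ("Clean", "No contamination detected.")

-- ===== PRECONDITION & SPEC =====
def Spec_check_for_contamination (description : String) (out : String × String) : Prop := out = check_for_contamination_alt description
instance (description : String) (out : String × String) : Decidable (Spec_check_for_contamination description out) := by unfold Spec_check_for_contamination; infer_instance

-- ===== CLAIM (what is proved, stated in full; the proofs are below) =====
def Claim_equal_check_for_contamination : Prop := ∀ (description : String), Dom_check_for_contamination description → Spec_check_for_contamination description (check_for_contamination description)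

-- ===== LEMMAS AND PROOFS =====

-- a fold of `min` over elements all ≥ a stays at a
theorem pv_foldl_min_of_le (l : List Int) (a : Int) (h : ∀ x ∈ l, a ≤ x) :
    l.foldl min a = a := by
  induction l generalizing a with
  | nil => rfl
  | cons x t ih =>
      have hax : a ≤ x := h x (by simp)
      simp only [List.foldl_cons, min_eq_left hax]
      exact ih a (fun y hy => h y (by simp [hy]))

-- filtering a constant-priority group and projecting the priorities gives a replicate
theorem pv_grp (g : List String) (i : Int) (p : String → Bool) :
    ((g.map (fun w => (w, i))).filter (fun kp => p kp.1)).map Prod.snd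
      = List.replicate (g.countP p) i := by
  induction g with
  | nil => rfl
  | cons w t ih =>
      by_cases hw : p w = true <;>
        simp [hw, ih, List.replicate_succ]

-- the min over one group's replicate followed by higher-priority tails
theorem pv_step (g : List String) (i : Int) (rest : List Int) (p : String → Bool)
    (h : ∀ j ∈ rest, i ≤ j) :
    PySem.List.min? (List.replicate (g.countP p) i ++ rest) (fun x => x)
      = if g.any p then some i else PySem.List.min? rest (fun x => x) := by
  cases hg : g.any p with
  | false =>
      have h0 : g.countP p = 0 := by
        rw [List.countP_eq_zero]
        intro a ha
        have := List.any_eq_false.mp hg a ha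
        simpa using this
      simp [h0]
  | true =>
      have hpos : g.countP p ≠ 0 := by
        intro h0
        rw [List.countP_eq_zero] at h0
        obtain ⟨a, ha, hpa⟩ := List.any_eq_true.mp hg
        exact h0 a ha hpa
      obtain ⟨n, hn⟩ : ∃ n, g.countP p = n + 1 :=
        ⟨g.countP p - 1, by omega⟩
      rw [hn, List.replicate_succ, List.cons_append, PySem.List.min?_id_cons]
      have : (List.replicate n i ++ rest).foldl min i = i := by
        apply pv_foldl_min_of_le
        intro x hx
        rcases List.mem_append.mp hx with hx | hx
        · exact le_of_eq (List.eq_of_mem_replicate hx).symm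
        · exact h x hx
      simp [this]

-- ===== VERDICT (by name: the statement is the Claim_ definition above) =====
theorem check_for_contamination_spec : Claim_equal_check_for_contamination := by
  intro description _
  unfold Spec_check_for_contamination check_for_contamination check_for_contamination_alt
  set p : String → Bool := fun w => PySem.Str.isIn w (PySem.Str.lower description) with hp
  have hflat : pvPriority
      = (["curry", "gravy", "sabzi", "masala", "dal"].map (fun w => (w, (0:Int))))
      ++ (["milk", "curd", "yogurt", "paneer", "cheese", "buttermilk"].map (fun w => (w, (1:Int))))
      ++ (["rice", "biryani", "fried rice", "leftover rice"].map (fun w => (w, (2:Int))))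
      ++ (["grease", "greasy", "butter", "ghee", "oil", "oily"].map (fun w => (w, (3:Int))))
      ++ (["vegetable", "peels", "boiled", "uncooked", "raw", "salad"].map (fun w => (w, (4:Int))))
      ++ (["wet", "soaked", "stained", "liquid", "moist"].map (fun w => (w, (5:Int))))
      ++ (["crumbs", "scrap", "leftover", "bite", "half-eaten"].map (fun w => (w, (6:Int))))
      ++ (["spoiled", "rotten", "stale", "smelly", "fungus", "mold"].map (fun w => (w, (7:Int)))) := by
    rfl
  rw [hflat]
  simp only [List.filter_append, List.map_append]
  rw [show (fun kp : String × Int => PySem.Str.isIn kp.1 (PySem.Str.lower description))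
        = (fun kp : String × Int => p kp.1) from rfl]
  rw [pv_grp, pv_grp, pv_grp, pv_grp, pv_grp, pv_grp, pv_grp, pv_grp]
  simp only [List.append_assoc]
  rw [pv_step _ 0 _ p (by intro j hj; simp [List.mem_append, List.mem_replicate] at hj; omega)]
  rw [pv_step _ 1 _ p (by intro j hj; simp [List.mem_append, List.mem_replicate] at hj; omega)]
  rw [pv_step _ 2 _ p (by intro j hj; simp [List.mem_append, List.mem_replicate] at hj; omega)]
  rw [pv_step _ 3 _ p (by intro j hj; simp [List.mem_append, List.mem_replicate] at hj; omega)]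
  rw [pv_step _ 4 _ p (by intro j hj; simp [List.mem_append, List.mem_replicate] at hj; omega)]
  rw [pv_step _ 5 _ p (by intro j hj; simp [List.mem_append, List.mem_replicate] at hj; omega)]
  rw [pv_step _ 6 _ p (by intro j hj; simp [List.mem_replicate] at hj; omega)]
  rw [show List.replicate ((["spoiled", "rotten", "stale", "smelly", "fungus", "mold"].countP p)) (7:Int)
        = List.replicate ((["spoiled", "rotten", "stale", "smelly", "fungus", "mold"].countP p)) (7:Int) ++ ([] : List Int) from (List.append_nil _).symm]
  rw [pv_step _ 7 ([] : List Int) p (by intro j hj; simp at hj)]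
  split_ifs <;> simp_all <;> rfl
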